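-- pv_equiv track=rewrite | github.com/zqlao/usaco | silver/2022/Jan/searching_for_soulmates/searching_for_soulmates.py | convert_b
-- ===== SOURCE A (Python) =====
-- def convert_b(b):
--     ans = [b]
--     while b > 1:
--         if b % 2 == 0:
--             b //= 2
--         else:
--             b -= 1
--         ans.append(b)
--     return ans
-- ===== SOURCE B (Python) =====
-- def convert_b(b):
--     if b <= 1:
--         return [b]
--     result = [1]
--     cur = 1
--     for bit in bin(b)[3:]:  # skip '0b' and the leading '1' bit
--         cur *= 2
--         result.append(cur)
--         if bit == '1':
--             cur += 1
--             result.append(cur)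
--     return result[::-1]
-- ===== Notes on version B (the rewrite author's own statement) =====
-- stated objective: alternative
-- what changed: B builds the sequence bottom-up following b's binary digits (doubling, then incrementing on a set bit) and reverses at the end, instead of reducing b downward by halving/decrementing.
import Mathlib
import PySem

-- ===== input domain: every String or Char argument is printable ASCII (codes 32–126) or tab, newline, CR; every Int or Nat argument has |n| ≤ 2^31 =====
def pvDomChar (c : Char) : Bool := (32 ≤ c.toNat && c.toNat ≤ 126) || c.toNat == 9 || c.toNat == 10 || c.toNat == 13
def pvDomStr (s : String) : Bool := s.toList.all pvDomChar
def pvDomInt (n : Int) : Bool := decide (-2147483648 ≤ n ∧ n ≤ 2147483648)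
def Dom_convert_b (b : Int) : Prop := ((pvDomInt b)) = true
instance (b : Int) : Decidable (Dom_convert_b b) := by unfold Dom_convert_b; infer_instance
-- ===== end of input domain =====

-- B builds the sequence bottom-up following b's binary digits (doubling, then incrementing
-- on a set bit) and reverses at the end, instead of reducing b downward by halving/decrementing.
-- Objective: alternative (same O(log b) cost, different decomposition).

-- ===== PORT A =====
-- A's while-loop: state (b, ans); terminates because b strictly decreases while b > 1
def convertLoopA (b : Int) (ans : List Int) : List Int :=
  if b > 1 then
    let b' := if PySem.Int.mod b 2 = 0 then PySem.Int.floordiv b 2 else b - 1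
    convertLoopA b' (ans ++ [b'])
  else ans
termination_by b.toNat
decreasing_by
  simp only [PySem.Int.floordiv_eq_ediv_of_pos (show (0:Int) < 2 by norm_num)]
  split <;> omega

def convert_b (b : Int) : List Int := convertLoopA b [b]

-- ===== PORT B =====
-- port of Python's bin(n)[2:] (msb-first binary digits; exact for n ≥ 1, the only use)
def pyBin (n : Nat) : List Char :=
  if n ≤ 1 then [if n = 1 then '1' else '0']
  else pyBin (n / 2) ++ [if n % 2 = 1 then '1' else '0']

def convert_b_alt (b : Int) : List Int :=
  if b ≤ 1 then [b]
  else
    (((pyBin b.toNat).drop 1).foldl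
      (fun (p : Int × List Int) (bit : Char) =>
        let cur := p.1 * 2
        let res := p.2 ++ [cur]
        if bit = '1' then (cur + 1, res ++ [cur + 1]) else (cur, res))
      (1, [1])).2.reverse

-- ===== PRECONDITION & SPEC =====
def Spec_convert_b (b : Int) (out : List Int) : Prop := out = convert_b_alt b
instance (b : Int) (out : List Int) : Decidable (Spec_convert_b b out) := by unfold Spec_convert_b; infer_instance

-- ===== CLAIM (what is proved, stated in full; the proofs are below) =====
def Claim_equal_convert_b : Prop := ∀ (b : Int), Dom_convert_b b → Spec_convert_b b (convert_b b)

-- ===== LEMMAS AND PROOFS =====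

theorem convertLoopA_append_aux (n : Nat) : ∀ (b : Int), b.toNat ≤ n →
    ∀ ans, convertLoopA b ans = ans ++ convertLoopA b [] := by
  induction n with
  | zero =>
    intro b hb ans
    have h : ¬ b > 1 := by omega
    rw [convertLoopA, if_neg h, convertLoopA, if_neg h]; simp
  | succ n ih =>
    intro b hb ans
    by_cases h : b > 1
    · have hb' : (if PySem.Int.mod b 2 = 0 then PySem.Int.floordiv b 2 else b - 1).toNat ≤ n := by
        simp only [PySem.Int.floordiv_eq_ediv_of_pos (show (0:Int) < 2 by norm_num),
          PySem.Int.mod_eq_emod_of_pos (show (0:Int) < 2 by norm_num)]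
        split <;> omega
      rw [convertLoopA, if_pos h]
      conv_rhs => rw [convertLoopA, if_pos h]
      simp only [List.nil_append]
      rw [ih _ hb' (ans ++ [_]), ih _ hb' [_]]
      simp
    · rw [convertLoopA, if_neg h, convertLoopA, if_neg h]; simp

theorem convertLoopA_append (b : Int) (ans : List Int) :
    convertLoopA b ans = ans ++ convertLoopA b [] :=
  convertLoopA_append_aux b.toNat b (le_refl _) ans

-- the downward sequence of A, head included
def seqA (b : Int) : List Int := b :: convertLoopA b []

theorem seqA_le (b : Int) (h : b ≤ 1) : seqA b = [b] := by
  rw [seqA, convertLoopA]; simp [not_lt.mpr h]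

theorem seqA_step (b : Int) (h : 1 < b) :
    seqA b = b :: seqA (if PySem.Int.mod b 2 = 0 then PySem.Int.floordiv b 2 else b - 1) := by
  rw [seqA, seqA]
  conv_lhs => rw [convertLoopA, if_pos h]
  rw [convertLoopA_append]
  simp

theorem pyBin_ne_nil (n : Nat) : pyBin n ≠ [] := by
  rw [pyBin]; split
  · simp
  · simp

theorem foldl_invariant (n : Nat) (hn : 1 ≤ n) :
    ((pyBin n).drop 1).foldl
      (fun (p : Int × List Int) (bit : Char) =>
        let cur := p.1 * 2
        let res := p.2 ++ [cur]
        if bit = '1' then (cur + 1, res ++ [cur + 1]) else (cur, res))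
      (1, [1]) = ((n : Int), (seqA (n : Int)).reverse) := by
  induction n using Nat.strong_induction_on with
  | _ n ih =>
    rw [pyBin]
    by_cases h1 : n ≤ 1
    · have : n = 1 := by omega
      subst this
      simp [seqA_le 1 (by norm_num)]
    · rw [if_neg h1]
      have hm : 1 ≤ n / 2 := by omega
      have hlen : 1 ≤ (pyBin (n / 2)).length :=
        List.length_pos_iff.mpr (pyBin_ne_nil _)
      rw [List.drop_append_of_le_length hlen, List.foldl_append,
        ih (n / 2) (by omega) hm]
      have hstep := seqA_step (n : Int) (by exact_mod_cast (by omega : (1:Nat) < n))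
      by_cases hpar : n % 2 = 1
      · -- odd case
        rw [if_pos hpar]
        have h2 : ((n : Int)) - 1 = 2 * ((n / 2 : Nat) : Int) := by omega
        have hb' : (if PySem.Int.mod (n : Int) 2 = 0 then PySem.Int.floordiv (n : Int) 2 else (n : Int) - 1) = (n : Int) - 1 := by
          rw [if_neg]
          rw [PySem.Int.mod_eq_emod_of_pos (show (0:Int) < 2 by norm_num)]
          omega
        have hstep2 := seqA_step ((n : Int) - 1) (by omega)
        have hb'' : (if PySem.Int.mod ((n : Int) - 1) 2 = 0 then PySem.Int.floordiv ((n : Int) - 1) 2 else (n : Int) - 1 - 1) = ((n / 2 : Nat) : Int) := by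
          rw [if_pos]
          · rw [PySem.Int.floordiv_eq_ediv_of_pos (show (0:Int) < 2 by norm_num)]
            omega
          · rw [PySem.Int.mod_eq_emod_of_pos (show (0:Int) < 2 by norm_num)]
            omega
        rw [hb'] at hstep
        rw [hb''] at hstep2
        simp only [List.foldl_cons, List.foldl_nil]
        rw [if_true, hstep, hstep2, Prod.mk.injEq]
        refine ⟨by omega, ?_⟩
        have e1 : ((n / 2 : Nat) : Int) * 2 = (n : Int) - 1 := by omega
        have e2 : (n : Int) - 1 + 1 = (n : Int) := by ring
        rw [List.reverse_cons, List.reverse_cons, e1, e2]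
      · -- even case
        have hpar0 : n % 2 = 0 := by omega
        rw [if_neg (by simp [hpar])]
        have h2 : ((n : Int)) = 2 * ((n / 2 : Nat) : Int) := by omega
        have hb' : (if PySem.Int.mod (n : Int) 2 = 0 then PySem.Int.floordiv (n : Int) 2 else (n : Int) - 1) = ((n / 2 : Nat) : Int) := by
          rw [if_pos]
          · rw [PySem.Int.floordiv_eq_ediv_of_pos (show (0:Int) < 2 by norm_num)]
            omega
          · rw [PySem.Int.mod_eq_emod_of_pos (show (0:Int) < 2 by norm_num)]
            omega
        rw [hb'] at hstep
        simp only [List.foldl_cons, List.foldl_nil]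
        rw [if_neg (show ('0' : Char) ≠ '1' by decide), hstep, Prod.mk.injEq]
        refine ⟨by omega, ?_⟩
        have e1 : ((n / 2 : Nat) : Int) * 2 = (n : Int) := by omega
        rw [List.reverse_cons, e1]

-- ===== VERDICT (by name: the statement is the Claim_ definition above) =====
theorem convert_b_spec : Claim_equal_convert_b := by
  intro b _
  unfold Spec_convert_b convert_b convert_b_alt
  by_cases h : b ≤ 1
  · rw [if_pos h, convertLoopA_append]
    have := seqA_le b h
    rw [seqA] at this
    simpa using this
  · rw [if_neg h]
    have hn : 1 ≤ b.toNat := by omega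
    have hcast : ((b.toNat : Int)) = b := by omega
    rw [foldl_invariant b.toNat hn, hcast]
    rw [seqA, List.reverse_reverse, convertLoopA_append]
    simp
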